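-- pv_equiv track=rewrite | github.com/JesperDramsch/advent-of-code | 2022/day10.py | check_program
-- ===== SOURCE A (Python) =====
-- def process_instruction(instruction, cycles, X):
--     add = 0
--     match instruction.split(" "):
--         case "noop",:
--             inc = 1
--         case "addx", add:
--             inc = 2
--             add = int(add)
--     return inc, add
--
-- def check_program(instructions, checks):
--     cycles, X = 0, 1
--     check = 20
--     for line in instructions:
--         inc, add = process_instruction(line, cycles, X)
--         if cycles < check <= cycles + inc:
--             checks[check] = X
--             check += 40
--         cycles += inc
--         X += add
--     return checks
-- ===== SOURCE B (Python) =====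
-- def check_program(instructions, checks):
--     X = 1
--     trace = []
--     for line in instructions:
--         match line.split(" "):
--             case "noop",:
--                 trace.append(X)
--             case "addx", v:
--                 trace.append(X)
--                 trace.append(X)
--                 X += int(v)
--             case _:
--                 raise ValueError(f"unknown instruction: {line}")
--     for c in range(20, len(trace) + 1, 40):
--         checks[c] = trace[c - 1]
--     return checks
-- ===== Notes on version B (the rewrite author's own statement) =====
-- stated objective: idiomatic
-- what changed: B builds the full per-cycle signal timeline once (one append per noop, two per addx, recording X before the add) and then reads the checkpoints 20, 60, ... directly out of it with range(20, len(signal)+1, 40), replacing A's streaming moving-checkpoint comparison inside the instruction loop.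
import Mathlib
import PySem

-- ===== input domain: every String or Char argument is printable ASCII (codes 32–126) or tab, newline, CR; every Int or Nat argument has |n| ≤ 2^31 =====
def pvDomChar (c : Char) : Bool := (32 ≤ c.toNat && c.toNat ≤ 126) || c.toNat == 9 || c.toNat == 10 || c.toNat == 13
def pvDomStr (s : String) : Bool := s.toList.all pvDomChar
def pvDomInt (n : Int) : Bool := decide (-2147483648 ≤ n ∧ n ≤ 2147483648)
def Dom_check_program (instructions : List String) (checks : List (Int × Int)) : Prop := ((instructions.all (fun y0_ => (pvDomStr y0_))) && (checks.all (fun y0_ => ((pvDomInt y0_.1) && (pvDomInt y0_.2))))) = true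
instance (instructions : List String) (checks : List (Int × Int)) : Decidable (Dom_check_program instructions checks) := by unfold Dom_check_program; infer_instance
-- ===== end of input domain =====

-- B builds the full per-cycle signal timeline once and then indexes the fixed checkpoints
-- 20, 60, … into it, instead of A's streaming moving-checkpoint comparison (objective: idiomatic).
-- Both A and B mutate the passed-in `checks` dict in place in Python; the equivalence proved
-- here is about the returned value (which is that same dict).


-- ===== PORT A =====
-- process_instruction: returns none exactly where the Python raises
-- (no match arm fires → UnboundLocalError, or int(add) → ValueError).
def pvProc (instruction : String) : Option (Int × Int) :=
  match PySem.Str.split? instruction " " with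
  | some ["noop"] => some (1, 0)
  | some ["addx", a] =>
    match PySem.Int.ofStr? a with
    | some n => some (2, n)
    | none => none
  | _ => none

-- the for-loop of A over (cycles, X, check, checks)
def pvLoopA : List String → Int → Int → Int → PySem.Dict Int Int → PySem.Dict Int Int
  | [], _, _, _, d => d
  | line :: rest, cycles, X, check, d =>
    match pvProc line with
    | none => d   -- unreachable under Pre_check_program (Python raises here)
    | some (inc, add) =>
      if cycles < check ∧ check ≤ cycles + inc then
        pvLoopA rest (cycles + inc) (X + add) (check + 40) (d.insert check X)
      else
        pvLoopA rest (cycles + inc) (X + add) check d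

def check_program (instructions : List String) (checks : List (Int × Int)) : List (Int × Int) :=
  (pvLoopA instructions 0 1 20 (PySem.Dict.ofList checks)).items

-- ===== PORT B =====
-- first loop of B: build the per-cycle timeline `signal`
-- ((PySem.Int.ofStr? v).getD 0: under Pre_ the parse always succeeds; Python B raises otherwise)
def pvSignal : List String → Int → List Int
  | [], _ => []
  | line :: rest, X =>
    match PySem.Str.split? line " " with
    | some ["noop"] => X :: pvSignal rest X
    | some ["addx", v] => X :: X :: pvSignal rest (X + (PySem.Int.ofStr? v).getD 0)
    | _ => pvSignal rest X   -- Python B raises ValueError here: outside Pre_check_program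

def check_program_alt (instructions : List String) (checks : List (Int × Int)) : List (Int × Int) :=
  let signal := pvSignal instructions 1
  ((PySem.List.pyRange 20 ((signal.length : Int) + 1) 40).foldl
    (fun d c => d.insert c (PySem.List.pyGetD signal (c - 1) 0)) (PySem.Dict.ofList checks)).items

-- ===== PRECONDITION & SPEC =====
-- an instruction is well-formed iff it is "noop" or "addx <int literal>" (split on a single space)
def pvValid (s : String) : Bool :=
  match PySem.Str.split? s " " with
  | some ["noop"] => true
  | some ["addx", a] => (PySem.Int.ofStr? a).isSome
  | _ => false

-- Pre_ excludes exactly the inputs where A raises: a line matching neither match-case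
-- (UnboundLocalError) or an "addx" operand int() rejects (ValueError).
def Pre_check_program (instructions : List String) (checks : List (Int × Int)) : Prop :=
  instructions.all pvValid = true
instance (instructions : List String) (checks : List (Int × Int)) : Decidable (Pre_check_program instructions checks) := by unfold Pre_check_program; infer_instance

def pvWitness_check_program : List String × (List (Int × Int)) := (["noop", "addx 3"], [(1, 2)])

def Spec_check_program (instructions : List String) (checks : List (Int × Int)) (out : List (Int × Int)) : Prop := out = check_program_alt instructions checks
instance (instructions : List String) (checks : List (Int × Int)) (out : List (Int × Int)) : Decidable (Spec_check_program instructions checks out) := by unfold Spec_check_program; infer_instance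

-- ===== CLAIM (what is proved, stated in full; the proofs are below) =====
def Claim_equal_check_program : Prop := ∀ (instructions : List String) (checks : List (Int × Int)), Dom_check_program instructions checks → Pre_check_program instructions checks → Spec_check_program instructions checks (check_program instructions checks)

-- ===== LEMMAS AND PROOFS =====

-- the checkpoint list k, k+40, k+80, … while ≤ n
def pvCps (k n : Int) : List Int :=
  if k ≤ n then k :: pvCps (k + 40) n else []
termination_by (n + 40 - k).toNat
decreasing_by omega

theorem pvRange40_nil (a b : Int) (h : b ≤ a) : PySem.List.pyRange a b 40 = [] := by
  rw [PySem.List.pyRange_of_pos a b (by norm_num)]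
  rw [if_neg (by omega)]
  simp

theorem pvRange40_cons (a b : Int) (h : a < b) :
    PySem.List.pyRange a b 40 = a :: PySem.List.pyRange (a + 40) b 40 := by
  rw [PySem.List.pyRange_of_pos a b (by norm_num),
      PySem.List.pyRange_of_pos (a + 40) b (by norm_num)]
  rw [if_pos h]
  by_cases h2 : a + 40 < b
  · rw [if_pos h2]
    have hm : ((b - a + 40 - 1) / 40).toNat = ((b - (a + 40) + 40 - 1) / 40).toNat + 1 := by
      omega
    rw [hm, List.range_succ_eq_map]
    simp only [List.map_cons, List.map_map]
    refine List.cons_eq_cons.mpr ⟨by push_cast; ring, ?_⟩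
    apply List.map_congr_left
    intro j _
    simp [Function.comp]
    ring
  · rw [if_neg h2]
    have hm : ((b - a + 40 - 1) / 40).toNat = 1 := by omega
    rw [hm]
    simp

theorem pvCps_eq_pyRange (k n : Int) : pvCps k n = PySem.List.pyRange k (n + 1) 40 := by
  rw [pvCps]
  split
  · rw [pvRange40_cons k (n+1) (by omega), pvCps_eq_pyRange (k + 40) n]
  · rw [pvRange40_nil k (n+1) (by omega)]
termination_by (n + 40 - k).toNat
decreasing_by omega

theorem pvCps_ge (k n : Int) : ∀ x ∈ pvCps k n, k ≤ x := by
  rw [pvCps]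
  split
  · intro x hx
    rcases List.mem_cons.mp hx with h1 | h1
    · omega
    · have := pvCps_ge (k + 40) n x h1
      omega
  · intro x hx; simp at hx
termination_by (n + 40 - k).toNat
decreasing_by omega

theorem pvGetD_shift (a : Int) (l : List Int) (i : Int) (h : 1 ≤ i) :
    (a :: l).getD i.toNat 0 = l.getD (i - 1).toNat 0 := by
  have : i.toNat = (i - 1).toNat + 1 := by omega
  rw [this, List.getD_cons_succ]

-- the loop invariant: A's streaming loop equals a fold of inserts over the checkpoint list,
-- reading values out of B's timeline for the remaining instructions
theorem pvLoopA_eq (rest : List String) : ∀ (c x k : Int) (d : PySem.Dict Int Int),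
    rest.all pvValid = true → c < k →
    pvLoopA rest c x k d =
      (pvCps k (c + ((pvSignal rest x).length : Int))).foldl
        (fun d ck => d.insert ck ((pvSignal rest x).getD (ck - c - 1).toNat 0)) d := by
  induction rest with
  | nil =>
    intro c x k d _ hck
    simp only [pvLoopA, pvSignal]
    rw [pvCps, if_neg (by simp; omega)]
    simp
  | cons line rest ih =>
    intro c x k d hall hck
    have hall' := hall
    rw [List.all_cons, Bool.and_eq_true] at hall'
    obtain ⟨hline, hrest⟩ := hall'
    unfold pvValid at hline
    split at hline
    case _ heq =>
      -- noop
      simp only [pvLoopA, pvProc, heq, pvSignal, add_zero, List.length_cons,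
        Nat.cast_add, Nat.cast_one]
      by_cases hle : k ≤ c + 1
      · rw [if_pos ⟨hck, hle⟩, ih (c + 1) x (k + 40) (d.insert k x) hrest (by omega)]
        conv_rhs => rw [pvCps, if_pos (show k ≤ c + ((pvSignal rest x).length + 1 : Int) by omega)]
        rw [List.foldl_cons]
        have h0 : (k - c - 1).toNat = 0 := by omega
        rw [h0, List.getD_cons_zero]
        have harg : c + 1 + ((pvSignal rest x).length : Int) = c + (((pvSignal rest x).length : Int) + 1) := by ring
        rw [harg]
        apply PySem.List.foldl_congr_mem
        intro acc ck hmem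
        have hge := pvCps_ge _ _ ck hmem
        rw [pvGetD_shift x _ (ck - c - 1) (by omega)]
        have : ck - c - 1 - 1 = ck - (c + 1) - 1 := by ring
        rw [this]
      · rw [if_neg (by omega), ih (c + 1) x k d hrest (by omega)]
        have harg : c + 1 + ((pvSignal rest x).length : Int) = c + (((pvSignal rest x).length : Int) + 1) := by ring
        rw [harg]
        apply PySem.List.foldl_congr_mem
        intro acc ck hmem
        have hge := pvCps_ge _ _ ck hmem
        rw [pvGetD_shift x _ (ck - c - 1) (by omega)]
        have : ck - c - 1 - 1 = ck - (c + 1) - 1 := by ring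
        rw [this]
    case _ a heq =>
      -- addx a
      obtain ⟨v, hv⟩ := Option.isSome_iff_exists.mp hline
      simp only [pvLoopA, pvProc, heq, hv, pvSignal, Option.getD_some, List.length_cons,
        Nat.cast_add, Nat.cast_one]
      by_cases hle : k ≤ c + 2
      · rw [if_pos ⟨hck, hle⟩, ih (c + 2) (x + v) (k + 40) (d.insert k x) hrest (by omega)]
        conv_rhs => rw [pvCps, if_pos (show k ≤ c + ((pvSignal rest (x + v)).length + 1 + 1 : Int) by omega)]
        rw [List.foldl_cons]
        have hval : (x :: x :: pvSignal rest (x + v)).getD (k - c - 1).toNat 0 = x := by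
          have h01 : (k - c - 1).toNat = 0 ∨ (k - c - 1).toNat = 1 := by omega
          rcases h01 with h0 | h1
          · rw [h0, List.getD_cons_zero]
          · rw [h1, List.getD_cons_succ, List.getD_cons_zero]
        rw [hval]
        have harg : c + 2 + ((pvSignal rest (x + v)).length : Int) = c + (((pvSignal rest (x + v)).length : Int) + 1 + 1) := by ring
        rw [harg]
        apply PySem.List.foldl_congr_mem
        intro acc ck hmem
        have hge := pvCps_ge _ _ ck hmem
        rw [pvGetD_shift x _ (ck - c - 1) (by omega),
            pvGetD_shift x _ (ck - c - 1 - 1) (by omega)]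
        have : ck - c - 1 - 1 - 1 = ck - (c + 2) - 1 := by ring
        rw [this]
      · rw [if_neg (by omega), ih (c + 2) (x + v) k d hrest (by omega)]
        have harg : c + 2 + ((pvSignal rest (x + v)).length : Int) = c + (((pvSignal rest (x + v)).length : Int) + 1 + 1) := by ring
        rw [harg]
        apply PySem.List.foldl_congr_mem
        intro acc ck hmem
        have hge := pvCps_ge _ _ ck hmem
        rw [pvGetD_shift x _ (ck - c - 1) (by omega),
            pvGetD_shift x _ (ck - c - 1 - 1) (by omega)]
        have : ck - c - 1 - 1 - 1 = ck - (c + 2) - 1 := by ring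
        rw [this]
    case _ =>
      exact absurd hline (by simp)

theorem check_program_spec : Claim_equal_check_program := by
  intro instructions checks _ hpre
  unfold Spec_check_program check_program check_program_alt
  rw [pvLoopA_eq instructions 0 1 20 (PySem.Dict.ofList checks) hpre (by norm_num)]
  have hcongr := PySem.List.foldl_congr_mem
    (pvCps 20 (0 + ((pvSignal instructions 1).length : Int)))
    (fun d ck => d.insert ck ((pvSignal instructions 1).getD (ck - 0 - 1).toNat 0))
    (fun d ck => d.insert ck (PySem.List.pyGetD (pvSignal instructions 1) (ck - 1) 0))
    (PySem.Dict.ofList checks)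
    (by
      intro acc ck hmem
      have hge := pvCps_ge _ _ ck hmem
      beta_reduce
      rw [PySem.List.pyGetD_of_nonneg _ _ (by omega : (0:Int) ≤ ck - 1)]
      have : ck - 0 - 1 = ck - 1 := by ring
      rw [this])
  rw [hcongr, pvCps_eq_pyRange]
  have : (0 : Int) + ((pvSignal instructions 1).length : Int) + 1 = ((pvSignal instructions 1).length : Int) + 1 := by ring
  rw [this]
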